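-- pv_equiv track=rewrite | github.com/susooo/Algorithm | 프로그래머스/2/150368. 이모티콘 할인행사/이모티콘 할인행사.py | solution
-- ===== SOURCE A (Python) =====
-- from itertools import product
--
-- def solution(users, emoticons):
--
--     discount_options = [40,30,20,10]
--     discount_idx = {10:0, 20:1, 30:2, 40:3}
--     discounted_prices = [
--         [price*90//100,price*80//100,price*70//100,price*60//100]
--         for price in emoticons
--     ]
--
--     n = len(emoticons)
--     max_join, max_value = 0,0
--
--     for discount_pattern in product(discount_options, repeat=n):
--         curr_join, curr_value = 0,0
--         for min_rate, threshold in users: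
--             each_value = 0
--
--             for i in range(n):
--                 if discount_pattern[i] >= min_rate:
--                     each_value += discounted_prices[i][discount_idx[discount_pattern[i]]]
--
--             if each_value >= threshold:
--                 curr_join += 1
--             else:
--                 curr_value += each_value
--
--         if max_join < curr_join:
--             max_join = curr_join
--             max_value = curr_value
--         elif max_join == curr_join and max_value < curr_value:
--             max_value = curr_value
--
--     return [max_join, max_value]
-- ===== SOURCE B (Python) =====
-- def solution(users, emoticons):
--     # Recursive depth-first choice of each emoticon's discount, threading
--     # per-user accumulated spend; no full per-pattern rescan of all emoticons.
--     def evaluate(spends):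
--         join = value = 0
--         for (_, threshold), s in zip(users, spends):
--             if s >= threshold:
--                 join += 1
--             else:
--                 value += s
--         return join, value
--
--     def update(best, cur):
--         if best[0] < cur[0]:
--             return cur
--         if best[0] == cur[0] and best[1] < cur[1]:
--             return (best[0], cur[1])
--         return best
--
--     def rec(ems, spends, best):
--         if not ems:
--             return update(best, evaluate(spends))
--         price, rest = ems[0], ems[1:]
--         for d in (40, 30, 20, 10):
--             disc = price * (100 - d) // 100
--             best = rec(rest,
--                        [s + disc if d >= mr else s
--                         for (mr, _), s in zip(users, spends)],
--                        best)
--         return best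
--
--     j, v = rec(list(emoticons), [0] * len(users), (0, 0))
--     return [j, v]
-- ===== Notes on version B (the rewrite author's own statement) =====
-- stated objective: alternative
-- what changed: Replaces the itertools.product enumeration with nested per-user rescans by a depth-first recursion that fixes one emoticon's discount per level and threads the per-user accumulated spend, so a complete pattern is evaluated from the accumulated spends without rescanning all emoticons per user.
import Mathlib
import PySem

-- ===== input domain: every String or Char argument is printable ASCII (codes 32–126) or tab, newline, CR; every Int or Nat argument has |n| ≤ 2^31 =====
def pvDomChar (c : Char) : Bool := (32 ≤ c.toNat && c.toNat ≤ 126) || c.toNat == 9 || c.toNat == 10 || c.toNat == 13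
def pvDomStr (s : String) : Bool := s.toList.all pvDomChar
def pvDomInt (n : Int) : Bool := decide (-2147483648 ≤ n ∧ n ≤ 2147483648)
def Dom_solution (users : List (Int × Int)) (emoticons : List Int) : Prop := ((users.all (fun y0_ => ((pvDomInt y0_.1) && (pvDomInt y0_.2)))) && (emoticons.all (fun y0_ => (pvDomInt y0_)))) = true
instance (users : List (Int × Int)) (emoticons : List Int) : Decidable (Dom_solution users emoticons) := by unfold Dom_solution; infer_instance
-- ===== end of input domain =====

-- B replaces A's product-pattern enumeration (a full per-user rescan of all emoticons
-- per pattern) by a depth-first recursion choosing one discount per level and threading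
-- per-user accumulated spends (objective: alternative, same cost class).

-- ===== PORT A =====
-- itertools.product([40,30,20,10], repeat=n) in Python's order (first coordinate slowest)
def aProduct : Nat → List (List Int)
  | 0 => [[]]
  | k + 1 => [(40 : Int), 30, 20, 10].flatMap (fun d => (aProduct k).map (fun p => d :: p))

-- discount_idx = {10:0, 20:1, 30:2, 40:3}
def aIdx : PySem.Dict Int Int := PySem.Dict.ofList [(10, 0), (20, 1), (30, 2), (40, 3)]

-- pyGetD/getD with defaults port the index/dict accesses; every index produced by
-- range(n) and every dict key produced by the pattern is in range/present, so the
-- defaults are never used and the port is exact.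
def solution (users : List (Int × Int)) (emoticons : List Int) : List Int :=
  let discounted : List (List Int) := emoticons.map (fun price =>
    [PySem.Int.floordiv (price * 90) 100, PySem.Int.floordiv (price * 80) 100,
     PySem.Int.floordiv (price * 70) 100, PySem.Int.floordiv (price * 60) 100])
  let n : Nat := emoticons.length
  let res : Int × Int := (aProduct n).foldl (fun best pat =>
    let cur : Int × Int := users.foldl (fun jv u =>
      let each : Int := (PySem.List.pyRange 0 (n : Int) 1).foldl (fun e i =>
        let d := PySem.List.pyGetD pat i 0
        if d ≥ u.1 then
          e + PySem.List.pyGetD (PySem.List.pyGetD discounted i []) (PySem.Dict.getD aIdx d 0) 0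
        else e) 0
      if each ≥ u.2 then (jv.1 + 1, jv.2) else (jv.1, jv.2 + each)) ((0 : Int), (0 : Int))
    if best.1 < cur.1 then cur
    else if best.1 = cur.1 ∧ best.2 < cur.2 then (best.1, cur.2)
    else best) ((0 : Int), (0 : Int))
  [res.1, res.2]

-- ===== PORT B =====
def pvEval (users : List (Int × Int)) (spends : List Int) : Int × Int :=
  (users.zip spends).foldl
    (fun jv us => if us.2 ≥ us.1.2 then (jv.1 + 1, jv.2) else (jv.1, jv.2 + us.2)) (0, 0)

def pvUpd (best cur : Int × Int) : Int × Int :=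
  if best.1 < cur.1 then cur
  else if best.1 = cur.1 ∧ best.2 < cur.2 then (best.1, cur.2)
  else best

def pvRec (users : List (Int × Int)) : List Int → List Int → Int × Int → Int × Int
  | [], spends, best => pvUpd best (pvEval users spends)
  | price :: rest, spends, best =>
    [(40 : Int), 30, 20, 10].foldl (fun b d =>
      pvRec users rest
        ((users.zip spends).map (fun us =>
          if d ≥ us.1.1 then us.2 + PySem.Int.floordiv (price * (100 - d)) 100 else us.2)) b) best

def solution_alt (users : List (Int × Int)) (emoticons : List Int) : List Int :=
  let r := pvRec users emoticons (users.map (fun _ => 0)) (0, 0)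
  [r.1, r.2]

-- ===== PRECONDITION & SPEC =====
def Spec_solution (users : List (Int × Int)) (emoticons : List Int) (out : List Int) : Prop := out = solution_alt users emoticons
instance (users : List (Int × Int)) (emoticons : List Int) (out : List Int) : Decidable (Spec_solution users emoticons out) := by unfold Spec_solution; infer_instance

-- ===== CLAIM (what is proved, stated in full; the proofs are below) =====
def Claim_equal_solution : Prop := ∀ (users : List (Int × Int)) (emoticons : List Int), Dom_solution users emoticons → Spec_solution users emoticons (solution users emoticons)

-- ===== LEMMAS AND PROOFS =====

-- total spend of a user with min_rate m over a zipped (price, discount) list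
def finS (m : Int) (l : List (Int × Int)) : Int :=
  l.foldl (fun e pd => if pd.2 ≥ m then e + PySem.Int.floordiv (pd.1 * (100 - pd.2)) 100 else e) 0

theorem finS_shift (m : Int) (l : List (Int × Int)) (e : Int) :
    l.foldl (fun e pd => if pd.2 ≥ m then e + PySem.Int.floordiv (pd.1 * (100 - pd.2)) 100 else e) e
      = e + finS m l := by
  induction l generalizing e with
  | nil => simp [finS]
  | cons pd t ih =>
    simp only [finS, List.foldl_cons]
    conv_lhs => rw [ih]
    conv_rhs => rw [ih]
    split_ifs <;> ring

theorem finS_cons (m p d : Int) (l : List (Int × Int)) :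
    finS m ((p, d) :: l)
      = (if d ≥ m then PySem.Int.floordiv (p * (100 - d)) 100 else 0) + finS m l := by
  conv_lhs => simp only [finS, List.foldl_cons]
  rw [finS_shift]
  split_ifs <;> ring

theorem aProduct_shape (n : Nat) (p : List Int) (hp : p ∈ aProduct n) :
    p.length = n ∧ ∀ d ∈ p, d = 40 ∨ d = 30 ∨ d = 20 ∨ d = 10 := by
  induction n generalizing p with
  | zero =>
    simp only [aProduct, List.mem_singleton] at hp
    subst hp; simp
  | succ k ih =>
    simp only [aProduct, List.mem_flatMap, List.mem_map] at hp
    obtain ⟨d, hd, q, hq, rfl⟩ := hp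
    obtain ⟨hlen, hmem⟩ := ih q hq
    refine ⟨by simp [hlen], ?_⟩
    intro x hx
    rcases List.mem_cons.mp hx with rfl | hx
    · simpa using hd
    · exact hmem x hx

-- the inner range-indexed loop of A computes finS over the zipped (price, discount) list
theorem inner_eq_finS (emoticons pat : List Int) (m : Int)
    (hl : pat.length = emoticons.length)
    (hmem : ∀ d ∈ pat, d = 40 ∨ d = 30 ∨ d = 20 ∨ d = 10) :
    (PySem.List.pyRange 0 (emoticons.length : Int) 1).foldl (fun e i =>
        let d := PySem.List.pyGetD pat i 0
        if d ≥ m then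
          e + PySem.List.pyGetD
              (PySem.List.pyGetD (emoticons.map (fun price =>
                [PySem.Int.floordiv (price * 90) 100, PySem.Int.floordiv (price * 80) 100,
                 PySem.Int.floordiv (price * 70) 100, PySem.Int.floordiv (price * 60) 100])) i [])
              (PySem.Dict.getD aIdx d 0) 0
        else e) 0
      = finS m (emoticons.zip pat) := by
  have hzs : (emoticons.zip pat).length = emoticons.length := by simp [hl]
  have i40 : PySem.Dict.getD aIdx 40 0 = 3 := by decide
  have i30 : PySem.Dict.getD aIdx 30 0 = 2 := by decide
  have i20 : PySem.Dict.getD aIdx 20 0 = 1 := by decide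
  have i10 : PySem.Dict.getD aIdx 10 0 = 0 := by decide
  have hstep : ∀ (e : Int), ∀ i ∈ PySem.List.pyRange 0 (emoticons.length : Int) 1,
      (fun (e : Int) (i : Int) =>
        let d := PySem.List.pyGetD pat i 0
        if d ≥ m then
          e + PySem.List.pyGetD
              (PySem.List.pyGetD (emoticons.map (fun price =>
                [PySem.Int.floordiv (price * 90) 100, PySem.Int.floordiv (price * 80) 100,
                 PySem.Int.floordiv (price * 70) 100, PySem.Int.floordiv (price * 60) 100])) i [])
              (PySem.Dict.getD aIdx d 0) 0
        else e) e i
      = (if (PySem.List.pyGetD (emoticons.zip pat) i ((0 : Int), (0 : Int))).2 ≥ m then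
          e + PySem.Int.floordiv
              ((PySem.List.pyGetD (emoticons.zip pat) i ((0 : Int), (0 : Int))).1
                * (100 - (PySem.List.pyGetD (emoticons.zip pat) i ((0 : Int), (0 : Int))).2)) 100
         else e) := by
    intro e i hi
    rw [PySem.List.mem_pyRange_one] at hi
    obtain ⟨h0, h1⟩ := hi
    have hkP : i.toNat < pat.length := by omega
    have e1 : PySem.List.pyGetD pat i 0 = pat[i.toNat] :=
      PySem.List.pyGetD_eq_getElem pat 0 h0 (by rw [hl]; exact h1)
    have e2 : PySem.List.pyGetD (emoticons.map (fun price =>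
        [PySem.Int.floordiv (price * 90) 100, PySem.Int.floordiv (price * 80) 100,
         PySem.Int.floordiv (price * 70) 100, PySem.Int.floordiv (price * 60) 100])) i []
        = [PySem.Int.floordiv (emoticons[i.toNat] * 90) 100,
           PySem.Int.floordiv (emoticons[i.toNat] * 80) 100,
           PySem.Int.floordiv (emoticons[i.toNat] * 70) 100,
           PySem.Int.floordiv (emoticons[i.toNat] * 60) 100] := by
      rw [PySem.List.pyGetD_eq_getElem _ _ h0 (by simpa using h1)]
      simp
    have e3 : PySem.List.pyGetD (emoticons.zip pat) i ((0 : Int), (0 : Int))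
        = (emoticons[i.toNat], pat[i.toNat]) := by
      rw [PySem.List.pyGetD_eq_getElem _ _ h0 (by rw [hzs]; exact h1)]
      simp [List.getElem_zip]
    simp only [e1, e2, e3]
    rcases hmem _ (List.getElem_mem hkP) with h4 | h4 | h4 | h4 <;>
      rw [h4] <;>
      simp only [i40, i30, i20, i10, PySem.List.pyGetD_ofNat', List.getD_cons_succ,
        List.getD_cons_zero] <;>
      split_ifs <;> norm_num
  rw [PySem.List.foldl_congr_mem _ _ _ _ hstep]
  have hlen' : ((emoticons.length : Int)) = (((emoticons.zip pat).length : Int)) := by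
    rw [hzs]
  rw [hlen', PySem.List.foldl_pyRange_zero_pyGetD' (emoticons.zip pat) ((0 : Int), (0 : Int))
      (fun (e : Int) (pd : Int × Int) =>
        if pd.2 ≥ m then e + PySem.Int.floordiv (pd.1 * (100 - pd.2)) 100 else e) 0]
  rfl

theorem zip_map_self (l : List (Int × Int)) (f : Int × Int → Int) :
    l.zip (l.map f) = l.map (fun u => (u, f u)) := by
  induction l with
  | nil => simp
  | cons a t ih => simp [ih]

theorem map_snd_zip_self (users : List (Int × Int)) (spends : List Int)
    (h : spends.length = users.length) :
    (users.zip spends).map (fun us => us.2) = spends := by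
  induction users generalizing spends with
  | nil => cases spends with
    | nil => simp
    | cons s st => simp at h
  | cons u ut ih =>
    cases spends with
    | nil => simp at h
    | cons s st =>
      simp only [List.zip_cons_cons, List.map_cons]
      rw [ih st (by simpa using h)]

theorem zip_map_zip (users : List (Int × Int)) (spends : List Int)
    (g : (Int × Int) × Int → Int) (h : spends.length = users.length) :
    users.zip ((users.zip spends).map g) = (users.zip spends).map (fun us => (us.1, g us)) := by
  induction users generalizing spends with
  | nil => simp
  | cons u ut ih =>
    cases spends with
    | nil => simp at h
    | cons s st =>
      simp only [List.zip_cons_cons, List.map_cons]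
      rw [ih st (by simpa using h)]

theorem pvEval_map_finS (users : List (Int × Int)) (zs : List (Int × Int)) :
    pvEval users (users.map (fun u => finS u.1 zs))
      = users.foldl (fun jv u =>
          if finS u.1 zs ≥ u.2 then (jv.1 + 1, jv.2) else (jv.1, jv.2 + finS u.1 zs)) (0, 0) := by
  unfold pvEval
  rw [zip_map_self, List.foldl_map]

theorem pvRec_eq_fold (users : List (Int × Int)) (ems : List Int) :
    ∀ (spends : List Int) (best : Int × Int), spends.length = users.length →
    pvRec users ems spends best
      = (aProduct ems.length).foldl
          (fun b pat => pvUpd b (pvEval users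
            ((users.zip spends).map (fun us => us.2 + finS us.1.1 (ems.zip pat))))) best := by
  induction ems with
  | nil =>
    intro spends best h
    have hz : (List.zip ([] : List Int) ([] : List Int)) = [] := rfl
    simp only [pvRec, List.length_nil, aProduct, List.foldl_cons, List.foldl_nil, hz,
      finS, add_zero]
    rw [map_snd_zip_self users spends h]
  | cons price rest ih =>
    intro spends best h
    have hS : ∀ d : Int,
        ((users.zip spends).map (fun us =>
          if d ≥ us.1.1 then us.2 + PySem.Int.floordiv (price * (100 - d)) 100 else us.2)).length
          = users.length := by
      intro d; simp [List.length_zip, h]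
    have helper : ∀ (d : Int) (b : Int × Int),
        pvRec users rest
          ((users.zip spends).map (fun us =>
            if d ≥ us.1.1 then us.2 + PySem.Int.floordiv (price * (100 - d)) 100 else us.2)) b
        = (aProduct rest.length).foldl (fun b pat => pvUpd b (pvEval users
            ((users.zip spends).map (fun us =>
              us.2 + finS us.1.1 ((price, d) :: rest.zip pat))))) b := by
      intro d b
      rw [ih _ b (hS d)]
      congr 1
      funext b' pat
      rw [zip_map_zip users spends _ h, List.map_map]
      have hmap : (users.zip spends).map
            ((fun us => us.2 + finS us.1.1 (rest.zip pat)) ∘ (fun us =>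
              (us.1, if d ≥ us.1.1 then us.2 + PySem.Int.floordiv (price * (100 - d)) 100 else us.2)))
          = (users.zip spends).map (fun us => us.2 + finS us.1.1 ((price, d) :: rest.zip pat)) := by
        apply List.map_congr_left
        intro us _
        show (if d ≥ us.1.1 then us.2 + PySem.Int.floordiv (price * (100 - d)) 100 else us.2)
              + finS us.1.1 (rest.zip pat)
            = us.2 + finS us.1.1 ((price, d) :: rest.zip pat)
        rw [finS_cons]
        split_ifs <;> ring
      rw [hmap]
    simp only [pvRec, List.foldl_cons, List.foldl_nil]
    rw [helper 40, helper 30, helper 20, helper 10]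
    simp only [List.length_cons, aProduct, List.flatMap_cons, List.flatMap_nil,
      List.append_nil, List.foldl_append, List.foldl_map, List.zip_cons_cons]

-- ===== VERDICT (by name: the statement is the Claim_ definition above) =====
theorem solution_spec : Claim_equal_solution := by
  unfold Claim_equal_solution
  intro users emoticons _
  unfold Spec_solution
  have hsolA : solution users emoticons = [(((aProduct emoticons.length).foldl (fun (best : Int × Int) (pat : List Int) =>
        let cur : Int × Int := users.foldl (fun jv u =>
          let each : Int := (PySem.List.pyRange 0 (emoticons.length : Int) 1).foldl (fun e i =>
            let d := PySem.List.pyGetD pat i 0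
            if d ≥ u.1 then
              e + PySem.List.pyGetD
                  (PySem.List.pyGetD (emoticons.map (fun price =>
                    [PySem.Int.floordiv (price * 90) 100, PySem.Int.floordiv (price * 80) 100,
                     PySem.Int.floordiv (price * 70) 100, PySem.Int.floordiv (price * 60) 100])) i [])
                  (PySem.Dict.getD aIdx d 0) 0
            else e) 0
          if each ≥ u.2 then (jv.1 + 1, jv.2) else (jv.1, jv.2 + each)) ((0 : Int), (0 : Int))
        if best.1 < cur.1 then cur
        else if best.1 = cur.1 ∧ best.2 < cur.2 then (best.1, cur.2)
        else best) ((0 : Int), (0 : Int)))).1, (((aProduct emoticons.length).foldl (fun (best : Int × Int) (pat : List Int) =>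
        let cur : Int × Int := users.foldl (fun jv u =>
          let each : Int := (PySem.List.pyRange 0 (emoticons.length : Int) 1).foldl (fun e i =>
            let d := PySem.List.pyGetD pat i 0
            if d ≥ u.1 then
              e + PySem.List.pyGetD
                  (PySem.List.pyGetD (emoticons.map (fun price =>
                    [PySem.Int.floordiv (price * 90) 100, PySem.Int.floordiv (price * 80) 100,
                     PySem.Int.floordiv (price * 70) 100, PySem.Int.floordiv (price * 60) 100])) i [])
                  (PySem.Dict.getD aIdx d 0) 0
            else e) 0
          if each ≥ u.2 then (jv.1 + 1, jv.2) else (jv.1, jv.2 + each)) ((0 : Int), (0 : Int))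
        if best.1 < cur.1 then cur
        else if best.1 = cur.1 ∧ best.2 < cur.2 then (best.1, cur.2)
        else best) ((0 : Int), (0 : Int)))).2] := rfl
  have hsolB : solution_alt users emoticons
      = [(pvRec users emoticons (users.map (fun _ => 0)) (0, 0)).1,
         (pvRec users emoticons (users.map (fun _ => 0)) (0, 0)).2] := rfl
  rw [hsolA, hsolB,
    pvRec_eq_fold users emoticons (users.map (fun _ => 0)) (0, 0) (by simp)]
  have hB : ∀ pat : List Int,
      (users.zip (users.map (fun _ => (0 : Int)))).map
          (fun us => us.2 + finS us.1.1 (emoticons.zip pat))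
        = users.map (fun u => finS u.1 (emoticons.zip pat)) := by
    intro pat
    rw [zip_map_self users (fun _ => 0), List.map_map]
    simp [Function.comp_def]
  have hA : ∀ (b : Int × Int), ∀ pat ∈ aProduct emoticons.length,
      (fun (best : Int × Int) (pat : List Int) =>
        let cur : Int × Int := users.foldl (fun jv u =>
          let each : Int := (PySem.List.pyRange 0 (emoticons.length : Int) 1).foldl (fun e i =>
            let d := PySem.List.pyGetD pat i 0
            if d ≥ u.1 then
              e + PySem.List.pyGetD
                  (PySem.List.pyGetD (emoticons.map (fun price =>
                    [PySem.Int.floordiv (price * 90) 100, PySem.Int.floordiv (price * 80) 100,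
                     PySem.Int.floordiv (price * 70) 100, PySem.Int.floordiv (price * 60) 100])) i [])
                  (PySem.Dict.getD aIdx d 0) 0
            else e) 0
          if each ≥ u.2 then (jv.1 + 1, jv.2) else (jv.1, jv.2 + each)) ((0 : Int), (0 : Int))
        if best.1 < cur.1 then cur
        else if best.1 = cur.1 ∧ best.2 < cur.2 then (best.1, cur.2)
        else best) b pat
      = pvUpd b (pvEval users (users.map (fun u => finS u.1 (emoticons.zip pat)))) := by
    intro b pat hp
    obtain ⟨hlen, hmem⟩ := aProduct_shape _ _ hp
    have hu : users.foldl (fun jv u =>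
          let each : Int := (PySem.List.pyRange 0 (emoticons.length : Int) 1).foldl (fun e i =>
            let d := PySem.List.pyGetD pat i 0
            if d ≥ u.1 then
              e + PySem.List.pyGetD
                  (PySem.List.pyGetD (emoticons.map (fun price =>
                    [PySem.Int.floordiv (price * 90) 100, PySem.Int.floordiv (price * 80) 100,
                     PySem.Int.floordiv (price * 70) 100, PySem.Int.floordiv (price * 60) 100])) i [])
                  (PySem.Dict.getD aIdx d 0) 0
            else e) 0
          if each ≥ u.2 then (jv.1 + 1, jv.2) else (jv.1, jv.2 + each)) ((0 : Int), (0 : Int))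
        = users.foldl (fun jv u =>
            if finS u.1 (emoticons.zip pat) ≥ u.2 then (jv.1 + 1, jv.2)
            else (jv.1, jv.2 + finS u.1 (emoticons.zip pat))) ((0 : Int), (0 : Int)) := by
      apply PySem.List.foldl_congr_mem
      intro jv u _
      simp only [inner_eq_finS emoticons pat u.1 hlen hmem]
    calc (fun (best : Int × Int) (pat : List Int) =>
        let cur : Int × Int := users.foldl (fun jv u =>
          let each : Int := (PySem.List.pyRange 0 (emoticons.length : Int) 1).foldl (fun e i =>
            let d := PySem.List.pyGetD pat i 0
            if d ≥ u.1 then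
              e + PySem.List.pyGetD
                  (PySem.List.pyGetD (emoticons.map (fun price =>
                    [PySem.Int.floordiv (price * 90) 100, PySem.Int.floordiv (price * 80) 100,
                     PySem.Int.floordiv (price * 70) 100, PySem.Int.floordiv (price * 60) 100])) i [])
                  (PySem.Dict.getD aIdx d 0) 0
            else e) 0
          if each ≥ u.2 then (jv.1 + 1, jv.2) else (jv.1, jv.2 + each)) ((0 : Int), (0 : Int))
        if best.1 < cur.1 then cur
        else if best.1 = cur.1 ∧ best.2 < cur.2 then (best.1, cur.2)
        else best) b pat
        = pvUpd b (users.foldl (fun jv u =>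
          let each : Int := (PySem.List.pyRange 0 (emoticons.length : Int) 1).foldl (fun e i =>
            let d := PySem.List.pyGetD pat i 0
            if d ≥ u.1 then
              e + PySem.List.pyGetD
                  (PySem.List.pyGetD (emoticons.map (fun price =>
                    [PySem.Int.floordiv (price * 90) 100, PySem.Int.floordiv (price * 80) 100,
                     PySem.Int.floordiv (price * 70) 100, PySem.Int.floordiv (price * 60) 100])) i [])
                  (PySem.Dict.getD aIdx d 0) 0
            else e) 0
          if each ≥ u.2 then (jv.1 + 1, jv.2) else (jv.1, jv.2 + each)) ((0 : Int), (0 : Int))) := rfl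
      _ = pvUpd b (users.foldl (fun jv u =>
            if finS u.1 (emoticons.zip pat) ≥ u.2 then (jv.1 + 1, jv.2)
            else (jv.1, jv.2 + finS u.1 (emoticons.zip pat))) ((0 : Int), (0 : Int))) := by
          rw [hu]
      _ = pvUpd b (pvEval users (users.map (fun u => finS u.1 (emoticons.zip pat)))) := by
          rw [← pvEval_map_finS]
  rw [PySem.List.foldl_congr_mem _ _
      (fun (b : Int × Int) (pat : List Int) =>
        pvUpd b (pvEval users (users.map (fun u => finS u.1 (emoticons.zip pat))))) _ hA]
  have hfun : (fun (b : Int × Int) (pat : List Int) => pvUpd b (pvEval users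
        ((users.zip (users.map (fun _ => (0 : Int)))).map
          (fun us => us.2 + finS us.1.1 (emoticons.zip pat)))))
      = (fun (b : Int × Int) (pat : List Int) =>
          pvUpd b (pvEval users (users.map (fun u => finS u.1 (emoticons.zip pat))))) := by
    funext b pat
    rw [hB pat]
  rw [hfun]
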